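-- pv_equiv track=rewrite | github.com/benochi/pylc | pa/reverseWordsWithPunc.py | reverseWords
-- ===== SOURCE A (Python) =====
-- def reverseWords(sentence):
--     if not sentence:
--         return ""
--
--     words = []
--     non_words = []  # spaces and punctuation
--     current_word = []
--     current_non_word = []
--
--     for char in sentence:
--         if char.isspace() or not char.isalnum():  # space or punctuation
--             if current_word:
--                 words.append(''.join(current_word))
--                 current_word = []
--             current_non_word.append(char)
--         else:
--             if current_non_word:
--                 non_words.append(''.join(current_non_word))
--                 current_non_word = []
--             current_word.append(char)
--
--     # Handle any remaining chunks
--     if current_word: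
--         words.append(''.join(current_word))
--     if current_non_word:
--         non_words.append(''.join(current_non_word))
--
--     # If the sentence starts with non-word, we need an extra empty word at the end
--     if not sentence[0].isalnum():
--         words.append('')
--
--     # If the sentence ends with word, we need an extra empty non-word
--     if sentence[-1].isalnum():
--         non_words.append('')
--
--     words.reverse()
--
--     # Reconstruct the sentence by interleaving
--     result = []
--     for word, non_word in zip(words, non_words):
--         result.append(word)
--         result.append(non_word)
--
--     return ''.join(result)
-- ===== SOURCE B (Python) =====
-- def reverseWords(sentence):
--     # Tokenize into maximal runs, tagged word/separator; then replay the runs,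
--     # filling word slots by popping from the word list (i.e. in reverse order).
--     toks = []
--     i, n = 0, len(sentence)
--     while i < n:
--         w = sentence[i].isalnum()
--         j = i
--         while j < n and sentence[j].isalnum() == w:
--             j += 1
--         toks.append((w, sentence[i:j]))
--         i = j
--     words = [run for w, run in toks if w]
--     out = []
--     for w, run in toks:
--         out.append(words.pop() if w else run)
--     return ''.join(out)
-- ===== Notes on version B (the rewrite author's own statement) =====
-- stated objective: simpler
-- what changed: A keeps words and separators in two parallel run lists plus empty-string sentinels and reassembles by reversing one list and zip-interleaving; B builds one tagged token list of maximal alnum/non-alnum runs in a single scan and replays it in order, popping the collected word list for each word slot, so no sentinels or zip bookkeeping are needed.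
import Mathlib
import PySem

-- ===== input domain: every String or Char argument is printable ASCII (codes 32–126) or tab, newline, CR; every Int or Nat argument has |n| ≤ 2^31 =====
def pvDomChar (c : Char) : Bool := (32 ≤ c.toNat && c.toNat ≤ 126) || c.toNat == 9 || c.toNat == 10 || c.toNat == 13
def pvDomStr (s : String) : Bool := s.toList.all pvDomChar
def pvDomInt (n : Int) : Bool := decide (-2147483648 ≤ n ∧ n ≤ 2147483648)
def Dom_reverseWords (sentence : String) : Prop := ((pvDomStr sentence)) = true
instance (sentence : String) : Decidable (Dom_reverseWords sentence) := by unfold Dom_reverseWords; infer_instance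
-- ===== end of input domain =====

-- B replaces A's two parallel run lists + empty-sentinel/zip interleave by a single tagged
-- token list replayed in order, filling word slots by popping the word list (objective: simpler).

-- ===== PORT A =====
-- loop state: (words, non_words, current_word, current_non_word); chunks kept as List Char,
-- ''.join deferred to the final String.ofList of the flattened chunk list (exact: join of chars)
def pvStepA (st : List (List Char) × List (List Char) × List Char × List Char) (c : Char) :
    List (List Char) × List (List Char) × List Char × List Char :=
  match st with
  | (ws, ns, cw, cn) =>
    if PySem.Chars.isspace c || !PySem.Chars.isalnum c then
      if cw ≠ [] then (ws ++ [cw], ns, [], cn ++ [c]) else (ws, ns, cw, cn ++ [c])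
    else
      if cn ≠ [] then (ws, ns ++ [cn], cw ++ [c], []) else (ws, ns, cw ++ [c], cn)

def reverseWords (sentence : String) : String :=
  let cs := sentence.toList
  if cs = [] then ""
  else
    match cs.foldl pvStepA ([], [], [], []) with
    | (ws0, ns0, cw, cn) =>
      let ws1 := if cw ≠ [] then ws0 ++ [cw] else ws0
      let ns1 := if cn ≠ [] then ns0 ++ [cn] else ns0
      let ws2 := if !PySem.Chars.isalnum (PySem.List.pyGetD cs 0 ' ') then ws1 ++ [[]] else ws1
      let ns2 := if PySem.Chars.isalnum (PySem.List.pyGetD cs (-1) ' ') then ns1 ++ [[]] else ns1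
      let result := ((ws2.reverse).zip ns2).foldl (fun acc p => acc ++ [p.1, p.2]) []
      String.ofList result.flatten

-- ===== PORT B =====
-- inner while loop of Source B: extend the run while the char class stays w
def pvTakeRun (w : Bool) : List Char → List Char × List Char
  | [] => ([], [])
  | c :: cs =>
    if PySem.Chars.isalnum c == w then
      let p := pvTakeRun w cs
      (c :: p.1, p.2)
    else ([], c :: cs)

-- needed by pvTok's termination proof
theorem pvTakeRun_snd_length (w : Bool) (cs : List Char) : (pvTakeRun w cs).2.length ≤ cs.length := by
  induction cs with
  | nil => simp [pvTakeRun]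
  | cons c cs ih =>
    simp only [pvTakeRun]
    split
    · exact Nat.le_succ_of_le ih
    · simp

-- outer while loop of Source B: one token per iteration, run = maximal same-class prefix
def pvTok : List Char → List (Bool × List Char)
  | [] => []
  | c :: cs =>
    let w := PySem.Chars.isalnum c
    let p := pvTakeRun w cs
    (w, c :: p.1) :: pvTok p.2
  termination_by cs => cs.length
  decreasing_by exact Nat.lt_succ_of_le (pvTakeRun_snd_length _ _)

-- Source B's final for loop: out.append(words.pop() if w else run)
-- (words.pop(): words is nonempty at every word token, so the [] default is never read)
def pvEmit : List (Bool × List Char) → List (List Char) → List (List Char)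
  | [], _ => []
  | (w, run) :: ts, words =>
    if w then (words.getLast?.getD []) :: pvEmit ts words.dropLast
    else run :: pvEmit ts words

def reverseWords_alt (sentence : String) : String :=
  let toks := pvTok sentence.toList
  let words := (toks.filter (fun t => t.1)).map (fun t => t.2)
  String.ofList (pvEmit toks words).flatten

-- ===== PRECONDITION & SPEC =====
def Spec_reverseWords (sentence : String) (out : String) : Prop := out = reverseWords_alt sentence
instance (sentence : String) (out : String) : Decidable (Spec_reverseWords sentence out) := by unfold Spec_reverseWords; infer_instance

-- ===== CLAIM (what is proved, stated in full; the proofs are below) =====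
def Claim_equal_reverseWords : Prop := ∀ (sentence : String), Dom_reverseWords sentence → Spec_reverseWords sentence (reverseWords sentence)

-- ===== LEMMAS AND PROOFS =====

def pvW (ts : List (Bool × List Char)) : List (List Char) := (ts.filter (fun t => t.1)).map (fun t => t.2)

def pvS (ts : List (Bool × List Char)) : List (List Char) := (ts.filter (fun t => !t.1)).map (fun t => t.2)

def pvFlat (ts : List (Bool × List Char)) : List Char := (ts.map (fun t => t.2)).flatten

def pvAdj : List (Bool × List Char) → Prop
  | [] => True
  | [_] => True
  | a :: b :: l => b.1 = !a.1 ∧ pvAdj (b :: l)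

def pvWF (ts : List (Bool × List Char)) : Prop :=
  (∀ t ∈ ts, t.2 ≠ [] ∧ ∀ c ∈ t.2, PySem.Chars.isalnum c = t.1) ∧ pvAdj ts

def pvLastTag (ts : List (Bool × List Char)) : Bool := ((ts.getLast?).map (fun t => t.1)).getD false

def pvRender : List (Bool × List Char) → List (List Char) → List (List Char)
  | [], _ => []
  | (true, _) :: ts, r :: rs => r :: pvRender ts rs
  | (true, _) :: ts, [] => [] :: pvRender ts []
  | (false, s) :: ts, rs => s :: pvRender ts rs

def pvFlush (st : List (List Char) × List (List Char) × List Char × List Char) :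
    List (List Char) × List (List Char) :=
  match st with
  | (ws, ns, cw, cn) => ((if cw ≠ [] then ws ++ [cw] else ws), (if cn ≠ [] then ns ++ [cn] else ns))

theorem pvSpaceNotAlnum (c : Char) (h : PySem.Chars.isalnum c = true) : PySem.Chars.isspace c = false := by
  simp only [PySem.Chars.isalnum, PySem.Chars.isalpha, PySem.Chars.isdigit, PySem.Chars.isupper,
    PySem.Chars.islower, Char.le_def, UInt32.le_iff_toNat_le, Bool.or_eq_true, Bool.and_eq_true, decide_eq_true_eq,
    show 'A'.val.toNat = 65 from rfl, show 'Z'.val.toNat = 90 from rfl,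
    show 'a'.val.toNat = 97 from rfl, show 'z'.val.toNat = 122 from rfl,
    show '0'.val.toNat = 48 from rfl, show '9'.val.toNat = 57 from rfl] at h
  simp only [PySem.Chars.isspace, Char.toNat, Bool.or_eq_false_iff, Bool.and_eq_false_iff,
    decide_eq_false_iff_not]
  omega

theorem pvSep_eq (c : Char) :
    (PySem.Chars.isspace c || !PySem.Chars.isalnum c) = !PySem.Chars.isalnum c := by
  cases h : PySem.Chars.isalnum c
  · simp
  · simp [pvSpaceNotAlnum c h]

theorem pvTakeRun_append (w : Bool) (cs : List Char) :
    (pvTakeRun w cs).1 ++ (pvTakeRun w cs).2 = cs := by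
  induction cs with
  | nil => simp [pvTakeRun]
  | cons c cs ih =>
    simp only [pvTakeRun]
    split
    · simpa using ih
    · simp

theorem pvTakeRun_fst_all (w : Bool) (cs : List Char) :
    ∀ c ∈ (pvTakeRun w cs).1, PySem.Chars.isalnum c = w := by
  induction cs with
  | nil => simp [pvTakeRun]
  | cons c cs ih =>
    simp only [pvTakeRun]
    split
    · rename_i h
      intro x hx
      rcases List.mem_cons.mp hx with rfl | hx
      · exact beq_iff_eq.mp h
      · exact ih x hx
    · simp

theorem pvTakeRun_snd_head (w : Bool) (cs : List Char) (c : Char) (cs' : List Char)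
    (h : (pvTakeRun w cs).2 = c :: cs') : PySem.Chars.isalnum c = !w := by
  induction cs with
  | nil => simp [pvTakeRun] at h
  | cons a cs ih =>
    simp only [pvTakeRun] at h
    split at h
    · exact ih h
    · rename_i hne
      have hac : a = c := by
        have := congrArg List.head? h
        simpa using this
      subst hac
      cases w <;> cases hh : PySem.Chars.isalnum a <;> simp_all

theorem pvTok_flat (cs : List Char) : pvFlat (pvTok cs) = cs := by
  induction cs using pvTok.induct with
  | case1 => simp [pvTok, pvFlat]
  | case2 c cs w p ih =>
    simp only [pvTok, pvFlat, List.map_cons, List.flatten_cons]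
    show (c :: p.1) ++ pvFlat (pvTok p.2) = c :: cs
    rw [show pvFlat (pvTok p.2) = p.2 from ih]
    simpa using pvTakeRun_append w cs

theorem pvTok_wf (cs : List Char) : pvWF (pvTok cs) := by
  induction cs using pvTok.induct with
  | case1 => exact ⟨by simp [pvTok], by simp [pvTok, pvAdj]⟩
  | case2 c cs w p ih =>
    refine ⟨?_, ?_⟩
    · intro t ht
      rw [pvTok] at ht
      rcases List.mem_cons.mp ht with rfl | ht
      · refine ⟨by simp, ?_⟩
        intro x hx
        rcases List.mem_cons.mp hx with rfl | hx
        · rfl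
        · exact pvTakeRun_fst_all w cs x hx
      · exact ih.1 t ht
    · show pvAdj (pvTok (c :: cs))
      rw [pvTok]
      rcases h2 : p.2 with _ | ⟨c', rest⟩
      · simp [pvTok, pvAdj]
      · have htag : PySem.Chars.isalnum c' = !w := pvTakeRun_snd_head w cs c' rest h2
        simp only [pvTok]
        refine ⟨by simpa using htag, ?_⟩
        have := ih.2
        rw [h2] at this
        simp only [pvTok] at this
        exact this

theorem pvAdj_tail (t : Bool × List Char) (ts : List (Bool × List Char)) (h : pvAdj (t :: ts)) :
    pvAdj ts := by
  cases ts with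
  | nil => trivial
  | cons t' ts' => exact h.2

theorem pvWF_tail (t : Bool × List Char) (ts : List (Bool × List Char)) (h : pvWF (t :: ts)) : pvWF ts :=
  ⟨fun x hx => h.1 x (List.mem_cons_of_mem t hx), pvAdj_tail t ts h.2⟩

theorem pvFlat_ne_nil (ts : List (Bool × List Char)) (h : pvWF ts) (hne : ts ≠ []) :
    pvFlat ts ≠ [] := by
  rcases ts with _ | ⟨t, ts⟩
  · exact absurd rfl hne
  · have ht := (h.1 t (List.mem_cons_self)).1
    simp only [pvFlat, List.map_cons, List.flatten_cons]
    simp [ht]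

theorem pvFirstClass (b : Bool) (r : List Char) (ts : List (Bool × List Char))
    (h : pvWF ((b, r) :: ts)) (d : Char) :
    PySem.Chars.isalnum (PySem.List.pyGetD (pvFlat ((b, r) :: ts)) 0 d) = b := by
  obtain ⟨hne, hcl⟩ := h.1 (b, r) (List.mem_cons_self)
  rcases r with _ | ⟨c, r'⟩
  · exact absurd rfl hne
  · simp only [pvFlat, List.map_cons, List.flatten_cons, List.cons_append]
    rw [PySem.List.pyGetD_zero_cons]
    exact hcl c (List.mem_cons_self)

theorem pvLast?Class (ts : List (Bool × List Char)) (h : pvWF ts) (hne : ts ≠ []) :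
    ∃ c, (pvFlat ts).getLast? = some c ∧ PySem.Chars.isalnum c = pvLastTag ts := by
  induction ts with
  | nil => exact absurd rfl hne
  | cons t ts ih =>
    rcases ts with _ | ⟨t', ts'⟩
    · obtain ⟨hne2, hcl⟩ := h.1 t (List.mem_cons_self)
      obtain ⟨c, hc⟩ := Option.isSome_iff_exists.mp (List.getLast?_isSome.mpr hne2)
      refine ⟨c, ?_, ?_⟩
      · simp only [pvFlat, List.map_cons, List.map_nil, List.flatten_cons, List.flatten_nil,
          List.append_nil]
        exact hc
      · simp only [pvLastTag, List.getLast?_singleton, Option.map_some, Option.getD_some]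
        exact hcl c (List.mem_of_getLast? hc)
    · have hwf' := pvWF_tail t _ h
      obtain ⟨c, hc, hcl⟩ := ih hwf' (by simp)
      refine ⟨c, ?_, ?_⟩
      · simp only [pvFlat, List.map_cons, List.flatten_cons] at hc ⊢
        rw [List.getLast?_append, hc]
        rfl
      · rw [show pvLastTag (t :: t' :: ts') = pvLastTag (t' :: ts') from by
          simp [pvLastTag, List.getLast?_cons_cons]]
        exact hcl

theorem pvLastClass (ts : List (Bool × List Char)) (h : pvWF ts) (hne : ts ≠ []) (d : Char) :
    PySem.Chars.isalnum (PySem.List.pyGetD (pvFlat ts) (-1) d) = pvLastTag ts := by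
  have hfl := pvFlat_ne_nil ts h hne
  obtain ⟨c, hc, hcl⟩ := pvLast?Class ts h hne
  rw [PySem.List.pyGetD_neg_one (pvFlat ts) d hfl]
  have := List.getLast?_eq_some_getLast (l := pvFlat ts) hfl
  rw [this] at hc
  rw [Option.some_inj.mp hc]
  exact hcl

theorem pvStepA_word (ws ns : List (List Char)) (cw cn : List Char) (c : Char)
    (h : PySem.Chars.isalnum c = true) :
    pvStepA (ws, ns, cw, cn) c = if cn ≠ [] then (ws, ns ++ [cn], cw ++ [c], []) else (ws, ns, cw ++ [c], cn) := by
  simp only [pvStepA]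
  rw [pvSep_eq, h]
  simp

theorem pvStepA_sep (ws ns : List (List Char)) (cw cn : List Char) (c : Char)
    (h : PySem.Chars.isalnum c = false) :
    pvStepA (ws, ns, cw, cn) c = if cw ≠ [] then (ws ++ [cw], ns, [], cn ++ [c]) else (ws, ns, cw, cn ++ [c]) := by
  simp only [pvStepA]
  rw [pvSep_eq, h]
  simp

theorem pvWordRunCont (r : List Char) (hall : ∀ c ∈ r, PySem.Chars.isalnum c = true) :
    ∀ ws ns cw, List.foldl pvStepA (ws, ns, cw, []) r = (ws, ns, cw ++ r, []) := by
  induction r with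
  | nil => intro ws ns cw; simp
  | cons c r ih =>
    intro ws ns cw
    rw [List.foldl_cons, pvStepA_word ws ns cw [] c (hall c (List.mem_cons_self)),
      if_neg (by simp),
      ih (fun x hx => hall x (List.mem_cons_of_mem c hx)) ws ns (cw ++ [c])]
    simp

theorem pvSepRunCont (r : List Char) (hall : ∀ c ∈ r, PySem.Chars.isalnum c = false) :
    ∀ ws ns cn, List.foldl pvStepA (ws, ns, [], cn) r = (ws, ns, [], cn ++ r) := by
  induction r with
  | nil => intro ws ns cn; simp
  | cons c r ih =>
    intro ws ns cn
    rw [List.foldl_cons, pvStepA_sep ws ns [] cn c (hall c (List.mem_cons_self)),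
      if_neg (by simp),
      ih (fun x hx => hall x (List.mem_cons_of_mem c hx)) ws ns (cn ++ [c])]
    simp

theorem pvWordRun (r : List Char) (hne : r ≠ []) (hall : ∀ c ∈ r, PySem.Chars.isalnum c = true)
    (ws ns : List (List Char)) (cn : List Char) :
    List.foldl pvStepA (ws, ns, [], cn) r = (ws, (if cn ≠ [] then ns ++ [cn] else ns), r, []) := by
  rcases r with _ | ⟨c, r⟩
  · exact absurd rfl hne
  · rw [List.foldl_cons, pvStepA_word ws ns [] cn c (hall c (List.mem_cons_self))]
    by_cases hcn : cn = []
    · subst hcn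
      rw [if_neg (by simp), List.nil_append,
        pvWordRunCont r (fun x hx => hall x (List.mem_cons_of_mem c hx)) ws ns [c]]
      simp
    · rw [if_pos hcn, List.nil_append,
        pvWordRunCont r (fun x hx => hall x (List.mem_cons_of_mem c hx)) ws (ns ++ [cn]) [c],
        if_pos hcn]
      simp

theorem pvSepRun (r : List Char) (hne : r ≠ []) (hall : ∀ c ∈ r, PySem.Chars.isalnum c = false)
    (ws ns : List (List Char)) (cw : List Char) :
    List.foldl pvStepA (ws, ns, cw, []) r = ((if cw ≠ [] then ws ++ [cw] else ws), ns, [], r) := by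
  rcases r with _ | ⟨c, r⟩
  · exact absurd rfl hne
  · rw [List.foldl_cons, pvStepA_sep ws ns cw [] c (hall c (List.mem_cons_self))]
    by_cases hcw : cw = []
    · subst hcw
      rw [if_neg (by simp), List.nil_append,
        pvSepRunCont r (fun x hx => hall x (List.mem_cons_of_mem c hx)) ws ns [c]]
      simp
    · rw [if_pos hcw, List.nil_append,
        pvSepRunCont r (fun x hx => hall x (List.mem_cons_of_mem c hx)) (ws ++ [cw]) ns [c],
        if_pos hcw]
      simp

theorem pvMain (ts : List (Bool × List Char)) :
    ∀ ws ns (b : Bool) (p : List Char), pvWF ts → p ≠ [] →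
    (∀ t ∈ ts.head?, t.1 = !b) →
    pvFlush (List.foldl pvStepA (ws, ns, cond b p [], cond b [] p) (pvFlat ts))
      = (ws ++ cond b [p] [] ++ pvW ts, ns ++ cond b [] [p] ++ pvS ts) := by
  induction ts with
  | nil =>
    intro ws ns b p _ hp _
    cases b <;> simp [pvFlat, pvFlush, pvW, pvS, hp]
  | cons t ts ih =>
    intro ws ns b p hwf hp hhead
    obtain ⟨b', r⟩ := t
    have hb' : b' = !b := hhead (b', r) (by simp)
    subst hb'
    obtain ⟨hr, hcl⟩ := hwf.1 (!b, r) (List.mem_cons_self)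
    have hclr : ∀ c ∈ r, PySem.Chars.isalnum c = !b := fun c hc => hcl c hc
    have hwf' : pvWF ts := pvWF_tail _ _ hwf
    have hhead' : ∀ t ∈ ts.head?, t.1 = !(!b) := by
      rcases ts with _ | ⟨t'', ts''⟩
      · intro x hx; simp at hx
      · intro x hx
        simp only [List.head?_cons, Option.mem_some_iff] at hx
        subst hx
        exact hwf.2.1
    have hflat : pvFlat ((!b, r) :: ts) = r ++ pvFlat ts := by simp [pvFlat]
    rw [hflat, List.foldl_append]
    cases b
    · -- pending separator p, word run r
      simp only [Bool.cond_false, Bool.not_false] at hclr hhead' ⊢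
      rw [pvWordRun r hr hclr ws ns p, if_pos hp]
      have := ih ws (ns ++ [p]) true r hwf' hr (by simpa using hhead')
      simp only [Bool.cond_true] at this
      rw [this]
      simp [pvW, pvS]
    · -- pending word p, separator run r
      simp only [Bool.cond_true, Bool.not_true] at hclr hhead' ⊢
      rw [pvSepRun r hr hclr ws ns p, if_pos hp]
      have := ih (ws ++ [p]) ns false r hwf' hr (by simpa using hhead')
      simp only [Bool.cond_false] at this
      rw [this]
      simp [pvW, pvS]

theorem pvA_chunks (cs : List Char) (hne : cs ≠ []) :
    pvFlush (List.foldl pvStepA ([], [], [], []) cs) = (pvW (pvTok cs), pvS (pvTok cs)) := by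
  rcases cs with _ | ⟨c, cs⟩
  · exact absurd rfl hne
  · have htok : pvTok (c :: cs) = (PySem.Chars.isalnum c, c :: (pvTakeRun (PySem.Chars.isalnum c) cs).1) :: pvTok (pvTakeRun (PySem.Chars.isalnum c) cs).2 := by
      simp only [pvTok]
    have hsplit : c :: cs = (c :: (pvTakeRun (PySem.Chars.isalnum c) cs).1) ++ (pvTakeRun (PySem.Chars.isalnum c) cs).2 := by
      simpa using (pvTakeRun_append (PySem.Chars.isalnum c) cs).symm
    have hall : ∀ x ∈ c :: (pvTakeRun (PySem.Chars.isalnum c) cs).1, PySem.Chars.isalnum x = PySem.Chars.isalnum c := by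
      intro x hx
      rcases List.mem_cons.mp hx with rfl | hx
      · rfl
      · exact pvTakeRun_fst_all _ cs x hx
    have hwf := pvTok_wf (c :: cs)
    rw [htok] at hwf
    have hwf2 := pvWF_tail _ _ hwf
    have hhead : ∀ t ∈ (pvTok (pvTakeRun (PySem.Chars.isalnum c) cs).2).head?, t.1 = !(PySem.Chars.isalnum c) := by
      have hadj := hwf.2
      rcases h2 : pvTok (pvTakeRun (PySem.Chars.isalnum c) cs).2 with _ | ⟨t'', ts''⟩
      · intro x hx; simp at hx
      · intro x hx
        simp only [List.head?_cons, Option.mem_some_iff] at hx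
        subst hx
        rw [h2] at hadj
        exact hadj.1
    have hflat2 := pvTok_flat (pvTakeRun (PySem.Chars.isalnum c) cs).2
    conv_lhs => rw [hsplit]
    rw [List.foldl_append]
    cases hwc : PySem.Chars.isalnum c
    · rw [hwc] at hall htok hhead hflat2 hwf2
      rw [pvSepRun _ (by simp) hall [] [] []]
      rw [if_neg (by simp)]
      have hm := pvMain _ [] [] false (c :: (pvTakeRun false cs).1) hwf2 (by simp) (by simpa using hhead)
      rw [hflat2] at hm
      simp only [Bool.cond_false] at hm
      rw [hm, htok]
      simp [pvW, pvS]
    · rw [hwc] at hall htok hhead hflat2 hwf2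
      rw [pvWordRun _ (by simp) hall [] [] []]
      rw [if_neg (by simp)]
      have hm := pvMain _ [] [] true (c :: (pvTakeRun true cs).1) hwf2 (by simp) (by simpa using hhead)
      rw [hflat2] at hm
      simp only [Bool.cond_true] at hm
      rw [hm, htok]
      simp [pvW, pvS]

theorem pvW_cons_true (w : List Char) (ts : List (Bool × List Char)) :
    pvW ((true, w) :: ts) = w :: pvW ts := by simp [pvW]

theorem pvW_cons_false (s : List Char) (ts : List (Bool × List Char)) :
    pvW ((false, s) :: ts) = pvW ts := by simp [pvW]

theorem pvS_cons_true (w : List Char) (ts : List (Bool × List Char)) :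
    pvS ((true, w) :: ts) = pvS ts := by simp [pvS]

theorem pvS_cons_false (s : List Char) (ts : List (Bool × List Char)) :
    pvS ((false, s) :: ts) = s :: pvS ts := by simp [pvS]

theorem pvLastTag_cons_cons (a b : Bool × List Char) (l : List (Bool × List Char)) :
    pvLastTag (a :: b :: l) = pvLastTag (b :: l) := by
  simp [pvLastTag, List.getLast?_cons_cons]

theorem pvEmit_render (ts : List (Bool × List Char)) :
    ∀ ws, pvEmit ts ws = pvRender ts ws.reverse := by
  induction ts with
  | nil => intro ws; rfl
  | cons t ts ih =>
    intro ws
    obtain ⟨w, run⟩ := t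
    cases w
    · rw [show pvEmit ((false, run) :: ts) ws = run :: pvEmit ts ws from by simp [pvEmit],
        show pvRender ((false, run) :: ts) ws.reverse = run :: pvRender ts ws.reverse from by
          simp [pvRender],
        ih ws]
    · cases hws : ws.reverse with
      | nil =>
        have hw : ws = [] := List.reverse_eq_nil_iff.mp hws
        subst hw
        rw [show pvEmit ((true, run) :: ts) [] = [] :: pvEmit ts [] from by simp [pvEmit],
          show pvRender ((true, run) :: ts) [] = [] :: pvRender ts [] from by
            simp [pvRender],
          ih []]
        rfl
      | cons r rs =>
        have hw : ws = rs.reverse ++ [r] := by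
          have := congrArg List.reverse hws
          simpa using this
        subst hw
        rw [
          show pvEmit ((true, run) :: ts) (rs.reverse ++ [r]) = r :: pvEmit ts rs.reverse from by
            simp [pvEmit],
          show pvRender ((true, run) :: ts) (r :: rs) = r :: pvRender ts rs from by simp [pvRender],
          ih rs.reverse, List.reverse_reverse]

theorem pvCore (n : Nat) : ∀ ts : List (Bool × List Char), ts.length ≤ n →
    ∀ rs : List (List Char), pvWF ts → (∀ t ∈ ts.head?, t.1 = true) →
    rs.length = (pvW ts).length →
    ((rs.zip (pvS ts ++ (if pvLastTag ts then [([] : List Char)] else []))).flatMap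
        (fun p => [p.1, p.2])).flatten
      = (pvRender ts rs).flatten := by
  induction n with
  | zero =>
    intro ts hlen rs _ _ hrs
    have : ts = [] := List.length_eq_zero_iff.mp (Nat.le_zero.mp hlen)
    subst this
    have : rs = [] := List.length_eq_zero_iff.mp (by simpa [pvW] using hrs)
    subst this
    rfl
  | succ n ih =>
    intro ts hlen rs hwf hhead hrs
    rcases ts with _ | ⟨⟨b, w⟩, ts'⟩
    · have : rs = [] := List.length_eq_zero_iff.mp (by simpa [pvW] using hrs)
      subst this
      rfl
    · have hb : b = true := hhead (b, w) (by simp)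
      subst hb
      rw [pvW_cons_true] at hrs
      rcases rs with _ | ⟨r, rs'⟩
      · simp at hrs
      · rcases ts' with _ | ⟨⟨b2, s⟩, ts''⟩
        · -- single word token
          have : rs' = [] := List.length_eq_zero_iff.mp (by simpa [pvW] using hrs)
          subst this
          simp [pvS, pvLastTag, pvRender]
        · have hb2 : b2 = false := by simpa using hwf.2.1
          subst hb2
          rw [pvS_cons_true, pvS_cons_false, pvLastTag_cons_cons]
          rw [show pvRender ((true, w) :: (false, s) :: ts'') (r :: rs')
                = r :: s :: pvRender ts'' rs' from by simp [pvRender]]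
          simp only [List.cons_append, List.zip_cons_cons, List.flatMap_cons, List.flatten_cons,
            List.flatten_append]
          rcases ts'' with _ | ⟨t3, ts3⟩
          · have : rs' = [] := List.length_eq_zero_iff.mp (by simpa [pvW] using hrs)
            subst this
            simp [pvLastTag, pvRender]
          · rw [pvLastTag_cons_cons]
            have hwf'' : pvWF (t3 :: ts3) := pvWF_tail _ _ (pvWF_tail _ _ hwf)
            have hhead'' : ∀ t ∈ (t3 :: ts3).head?, t.1 = true := by
              intro x hx
              simp only [List.head?_cons, Option.mem_some_iff] at hx
              subst hx
              simpa using hwf.2.2.1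
            have hlen'' : (t3 :: ts3).length ≤ n := by
              simp only [List.length_cons] at hlen ⊢
              omega
            have hrs'' : rs'.length = (pvW (t3 :: ts3)).length := by
              rw [pvW_cons_false] at hrs
              simpa using hrs
            have := ih (t3 :: ts3) hlen'' rs' hwf'' hhead'' hrs''
            rw [this]
            simp

theorem pvEq (sentence : String) : reverseWords sentence = reverseWords_alt sentence := by
  rcases hcs : sentence.toList with _ | ⟨c, cs0⟩
  · rw [reverseWords, reverseWords_alt, hcs]
    rw [show pvTok [] = [] from by simp [pvTok]]
    rfl
  · have hne : sentence.toList ≠ [] := by rw [hcs]; exact List.cons_ne_nil _ _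
    rw [reverseWords, reverseWords_alt]
    simp only [if_neg hne]
    rcases hst : List.foldl pvStepA ([], [], [], []) sentence.toList with ⟨ws0, ns0, cw, cn⟩
    dsimp only
    have hch := pvA_chunks sentence.toList hne
    rw [hst] at hch
    have hws1 : (if cw ≠ [] then ws0 ++ [cw] else ws0) = pvW (pvTok sentence.toList) := by
      have := congrArg Prod.fst hch
      simpa [pvFlush] using this
    have hns1 : (if cn ≠ [] then ns0 ++ [cn] else ns0) = pvS (pvTok sentence.toList) := by
      have := congrArg Prod.snd hch
      simpa [pvFlush] using this
    rw [hws1, hns1]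
    have hwf := pvTok_wf sentence.toList
    have hflat := pvTok_flat sentence.toList
    have htne : pvTok sentence.toList ≠ [] := by
      intro h
      rw [h] at hflat
      exact hne (by simpa [pvFlat] using hflat.symm)
    -- first and last character classes
    have hlc : PySem.Chars.isalnum (PySem.List.pyGetD sentence.toList (-1) ' ')
        = pvLastTag (pvTok sentence.toList) := by
      have := pvLastClass (pvTok sentence.toList) hwf htne ' '
      rwa [hflat] at this
    rcases hts : pvTok sentence.toList with _ | ⟨⟨b0, r0⟩, ts0⟩
    · exact absurd hts htne
    · have hfc : PySem.Chars.isalnum (PySem.List.pyGetD sentence.toList 0 ' ') = b0 := by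
        have := pvFirstClass b0 r0 ts0 (hts ▸ hwf) ' '
        rw [← hts, hflat] at this
        exact this
      rw [hts] at hlc hwf
      rw [hfc, hlc]
      rw [show ((((b0, r0) :: ts0).filter (fun t => t.1)).map (fun t => t.2))
            = pvW ((b0, r0) :: ts0) from rfl]
      rw [pvEmit_render]
      have hfold : ∀ L : List (List Char × List Char),
          List.foldl (fun acc p => acc ++ [p.1, p.2]) ([] : List (List Char)) L
            = L.flatMap (fun p => [p.1, p.2]) := by
        intro L
        simpa using PySem.List.foldl_append_eq_flatMap
          (fun p : List Char × List Char => [p.1, p.2]) L []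
      rw [hfold]
      have hpad : ∀ (A : List (List Char)) (b : Bool),
          (if b = true then A ++ [[]] else A) = A ++ (if b = true then [([] : List Char)] else []) := by
        intro A b; cases b <;> simp
      cases b0
      · -- leading separator run
        rw [if_pos (by decide : (!false) = true), hpad]
        rw [pvW_cons_false, pvS_cons_false]
        rw [show pvRender ((false, r0) :: ts0) (pvW ts0).reverse
              = r0 :: pvRender ts0 (pvW ts0).reverse from by simp [pvRender]]
        rw [List.reverse_append, List.reverse_singleton]
        simp only [List.cons_append]
        rcases ts0 with _ | ⟨t1, ts1⟩
        · simp [pvW, pvS, pvLastTag, pvRender]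
        · rw [pvLastTag_cons_cons]
          have hcore := pvCore (t1 :: ts1).length (t1 :: ts1) le_rfl ((pvW (t1 :: ts1)).reverse)
            (pvWF_tail _ _ hwf)
            (by
              intro x hx
              simp only [List.head?_cons, Option.mem_some_iff] at hx
              subst hx
              simpa using hwf.2.1)
            (by simp)
          simp only [List.zip_cons_cons, List.flatMap_cons, List.flatten_cons, List.nil_append,
            List.flatten_append, List.flatten_nil, List.append_nil]
          rw [hcore]
      · -- leading word run
        rw [if_neg (by decide : ¬((!true) = true)), hpad]
        have hcore := pvCore ((true, r0) :: ts0).length ((true, r0) :: ts0) le_rfl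
          ((pvW ((true, r0) :: ts0)).reverse) hwf (by simp) (by simp)
        rw [hcore]

-- ===== VERDICT (by name: the statement is the Claim_ definition above) =====
theorem reverseWords_spec : Claim_equal_reverseWords := by
  intro sentence _
  exact pvEq sentence
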